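-- pv_equiv track=rewrite | github.com/blancdu/Algorithm_Study | BOJ/23291/23291_1.py | board_to_list
-- ===== SOURCE A (Python) =====
-- def board_to_list(board):
--     fish_list = []
--     for c in range(len(board[-1])):
--         for r in range(len(board)-1, -1, -1):
--             try:
--                 fish_list.append(board[r][c])
--             except IndexError:
--                 continue
--     return fish_list
-- ===== SOURCE B (Python) =====
-- def board_to_list(board):
--     ncols = len(board[-1])
--     cols = [[] for _ in range(ncols)]
--     for row in board:
--         for c in range(min(len(row), ncols)):
--             cols[c].append(row[c])
--     out = []
--     for bucket in cols:
--         out.extend(reversed(bucket))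
--     return out
-- ===== Notes on version B (the rewrite author's own statement) =====
-- stated objective: alternative
-- what changed: Replaces A's column-major nested scan with try/except probing of every (row,col) cell by a single row-major pass that scatters each row's first ncols entries into per-column bucket lists, then concatenates the buckets reversed.
import Mathlib
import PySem

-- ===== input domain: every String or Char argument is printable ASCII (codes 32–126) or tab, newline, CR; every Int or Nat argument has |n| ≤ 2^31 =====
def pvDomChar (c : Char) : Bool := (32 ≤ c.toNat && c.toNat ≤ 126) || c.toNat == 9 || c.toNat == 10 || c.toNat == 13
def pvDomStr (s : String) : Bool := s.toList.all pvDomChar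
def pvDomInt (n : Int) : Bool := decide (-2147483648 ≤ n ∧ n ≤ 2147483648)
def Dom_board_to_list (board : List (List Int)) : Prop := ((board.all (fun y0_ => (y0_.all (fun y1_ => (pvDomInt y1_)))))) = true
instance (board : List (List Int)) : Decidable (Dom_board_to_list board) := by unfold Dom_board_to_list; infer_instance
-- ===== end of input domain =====

-- B re-implements A by a row-major scatter into per-column buckets instead of A's
-- column-major probe of every cell; equivalence of the return values is proved on
-- non-empty boards (on [] the Python A raises IndexError, as does B).

-- ===== PORT A =====
-- column-major: for each c in range(len(board[-1])), walk rows bottom-to-top,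
-- appending board[r][c] when it exists (IndexError -> skip).
def board_to_list (board : List (List Int)) : List Int :=
  -- board[-1]; the IndexError case (empty board) is excluded by Pre_, defaulted here
  let last := PySem.List.pyGetD board (-1) []
  (PySem.List.pyRange 0 (last.length : Int) 1).foldl (fun acc c =>
    (PySem.List.pyRange ((board.length : Int) - 1) (-1) (-1)).foldl (fun acc r =>
      match PySem.List.pyGet? board r with
      | none => acc
      | some row =>
        match PySem.List.pyGet? row c with
        | none => acc
        | some v => acc ++ [v]) acc) []

-- ===== PORT B =====
-- row-major scatter: one pass over rows filling per-column buckets, then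
-- concatenate each bucket reversed.
def board_to_list_alt (board : List (List Int)) : List Int :=
  -- len(board[-1]); the IndexError case (empty board) is excluded by Pre_, defaulted here
  let last := PySem.List.pyGetD board (-1) []
  let ncols := last.length
  let cols0 : List (List Int) := (List.range ncols).map (fun _ => ([] : List Int))
  let cols := board.foldl (fun cols row =>
    (PySem.List.pyRange 0 (min (row.length : Int) (ncols : Int)) 1).foldl (fun cols c =>
      PySem.List.pySetD cols c
        (PySem.List.pyGetD cols c [] ++ [PySem.List.pyGetD row c 0])) cols) cols0
  cols.foldl (fun out bucket => out ++ bucket.reverse) []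

-- ===== PRECONDITION & SPEC =====
-- Pre_ excludes only the empty board, where Python A raises IndexError at board[-1].
def Pre_board_to_list (board : List (List Int)) : Prop := board ≠ []
instance (board : List (List Int)) : Decidable (Pre_board_to_list board) := by
  unfold Pre_board_to_list; infer_instance

def pvWitness_board_to_list : List (List Int) := [[1, 2], [3], [4, 5, 6]]

def Spec_board_to_list (board : List (List Int)) (out : List Int) : Prop := out = board_to_list_alt board
instance (board : List (List Int)) (out : List Int) : Decidable (Spec_board_to_list board out) := by unfold Spec_board_to_list; infer_instance

-- ===== CLAIM (what is proved, stated in full; the proofs are below) =====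
def Claim_equal_board_to_list : Prop := ∀ (board : List (List Int)), Dom_board_to_list board → Pre_board_to_list board → Spec_board_to_list board (board_to_list board)

-- ===== LEMMAS AND PROOFS =====

-- the per-column bucket table after scattering the given rows
def colsOf (rows : List (List Int)) (n : Nat) : List (List Int) :=
  (List.range n).map (fun c => rows.filterMap (fun row => row[c]?))

-- the common normal form both ports are reduced to
def gather (board : List (List Int)) (n : Nat) : List Int :=
  (List.range n).flatMap (fun c => (board.filterMap (fun row => row[c]?)).reverse)

lemma flatMap_toList_eq_filterMap {α β : Type} (l : List α) (f : α → Option β) :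
    l.flatMap (fun a => (f a).toList) = l.filterMap f := by
  induction l with
  | nil => rfl
  | cons x xs ih => cases h : f x <;> simp [h, ih]

lemma filterMap_range_get {α β : Type} (xs : List α) (f : α → Option β) :
    (List.range xs.length).filterMap (fun k => xs[k]?.bind f) = xs.filterMap f := by
  induction xs with
  | nil => rfl
  | cons x xs ih =>
    rw [List.length_cons, List.range_succ_eq_map, List.filterMap_cons, List.filterMap_map]
    cases h : f x <;>
      simp [h, ← ih]

-- A's inner row loop gathers column c bottom-to-top
lemma innerA_eq (board : List (List Int)) (c : Int) (acc : List Int) :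
    (PySem.List.pyRange ((board.length : Int) - 1) (-1) (-1)).foldl (fun acc r =>
        match PySem.List.pyGet? board r with
        | none => acc
        | some row =>
          match PySem.List.pyGet? row c with
          | none => acc
          | some v => acc ++ [v]) acc
    = acc ++ (board.filterMap (fun row => PySem.List.pyGet? row c)).reverse := by
  have hf : (fun (acc : List Int) (r : Int) =>
      match PySem.List.pyGet? board r with
      | none => acc
      | some row =>
        match PySem.List.pyGet? row c with
        | none => acc
        | some v => acc ++ [v])
      = fun acc r =>
        acc ++ ((PySem.List.pyGet? board r).bind (fun row => PySem.List.pyGet? row c)).toList := by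
    funext a r
    cases hb : PySem.List.pyGet? board r with
    | none => simp
    | some row => cases hr : PySem.List.pyGet? row c <;> simp [hr]
  rw [hf, PySem.List.foldl_append_eq_flatMap, flatMap_toList_eq_filterMap]
  have hrev : PySem.List.pyRange ((board.length : Int) - 1) (-1) (-1)
      = (PySem.List.pyRange 0 (board.length : Int) 1).reverse := by
    have := PySem.List.pyRange_neg_one_eq_reverse ((board.length : Int) - 1) (-1)
    simpa using this
  rw [hrev, List.filterMap_reverse, PySem.List.pyRange_zero_nat, List.filterMap_map]
  simp only [Function.comp_def, PySem.List.pyGet?_natCast]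
  rw [filterMap_range_get]

-- A's outer column loop equals the normal form
lemma foldA_eq (board : List (List Int)) (n : Nat) :
    (PySem.List.pyRange 0 (n : Int) 1).foldl (fun acc c =>
      (PySem.List.pyRange ((board.length : Int) - 1) (-1) (-1)).foldl (fun acc r =>
        match PySem.List.pyGet? board r with
        | none => acc
        | some row =>
          match PySem.List.pyGet? row c with
          | none => acc
          | some v => acc ++ [v]) acc) []
    = gather board n := by
  have hf : (fun (acc : List Int) (c : Int) =>
      (PySem.List.pyRange ((board.length : Int) - 1) (-1) (-1)).foldl (fun acc r =>
        match PySem.List.pyGet? board r with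
        | none => acc
        | some row =>
          match PySem.List.pyGet? row c with
          | none => acc
          | some v => acc ++ [v]) acc)
      = fun acc c => acc ++ (board.filterMap (fun row => PySem.List.pyGet? row c)).reverse := by
    funext a c
    exact innerA_eq board c a
  rw [hf, PySem.List.foldl_append_eq_flatMap, PySem.List.pyRange_zero_nat, List.flatMap_map]
  unfold gather
  simp [Function.comp_def, PySem.List.pyGet?_natCast]

-- the Nat-indexed form of B's inner scatter loop
lemma setfold (row : List Int) (m : Nat) :
    ∀ (cols : List (List Int)), m ≤ cols.length →
    (List.range m).foldl (fun cs c => cs.set c (cs.getD c [] ++ [row.getD c 0])) cols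
    = cols.mapIdx (fun c b => if c < m then b ++ [row.getD c 0] else b) := by
  induction m with
  | zero =>
    intro cols _
    simp
    apply List.ext_getElem <;> simp
  | succ m ih =>
    intro cols hm
    rw [List.range_succ, List.foldl_append]
    rw [ih cols (by omega)]
    have hmlen : m < cols.length := by omega
    set X := cols.mapIdx (fun c b => if c < m then b ++ [row.getD c 0] else b) with hX
    have hXlen : X.length = cols.length := by simp [hX]
    have hXm : X.getD m [] = cols[m] := by
      rw [List.getD_eq_getElem?_getD]
      rw [List.getElem?_eq_getElem (by omega)]
      simp [hX, List.getElem_mapIdx]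
    simp only [List.foldl_cons, List.foldl_nil]
    rw [hXm]
    apply List.ext_getElem
    · simp [hX]
    · intro i hi1 hi2
      rw [List.getElem_set]
      simp only [List.getElem_mapIdx]
      by_cases h1 : m = i
      · subst h1; simp
      · simp only [if_neg h1, hX, List.getElem_mapIdx]
        have hlen : i < cols.length := by simpa [hX] using hi1
        by_cases h2 : i < m
        · rw [if_pos h2, if_pos (by omega)]
        · rw [if_neg h2, if_neg (by omega)]

-- scattering one row updates the bucket table
lemma stepRow (pre : List (List Int)) (row : List Int) (ncols : Nat) :
    (PySem.List.pyRange 0 (min (row.length : Int) (ncols : Int)) 1).foldl (fun cols c =>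
        PySem.List.pySetD cols c
          (PySem.List.pyGetD cols c [] ++ [PySem.List.pyGetD row c 0])) (colsOf pre ncols)
    = colsOf (pre ++ [row]) ncols := by
  have hmin : min (row.length : Int) (ncols : Int) = ((min row.length ncols : Nat) : Int) := by
    omega
  rw [hmin, PySem.List.pyRange_zero_nat, List.foldl_map]
  simp only [PySem.List.pySetD_natCast, PySem.List.pyGetD_natCast]
  rw [setfold row (min row.length ncols) (colsOf pre ncols) (by simp [colsOf])]
  apply List.ext_getElem
  · simp [colsOf]
  · intro c hc1 hc2
    have hcn : c < ncols := by simpa [colsOf] using hc2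
    simp only [List.getElem_mapIdx, colsOf, List.getElem_map, List.getElem_range]
    rw [List.filterMap_append]
    by_cases h : c < row.length
    · rw [if_pos (by omega)]
      have : row[c]? = some row[c] := List.getElem?_eq_getElem h
      simp [this, List.getD_eq_getElem?_getD]
    · rw [if_neg (by omega)]
      have : row[c]? = none := List.getElem?_eq_none (by omega)
      simp [this]

-- B's whole row pass builds the bucket table for all rows
lemma outerB (ncols : Nat) (rest : List (List Int)) :
    ∀ (pre : List (List Int)),
    rest.foldl (fun cols row =>
      (PySem.List.pyRange 0 (min (row.length : Int) (ncols : Int)) 1).foldl (fun cols c =>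
        PySem.List.pySetD cols c
          (PySem.List.pyGetD cols c [] ++ [PySem.List.pyGetD row c 0])) cols) (colsOf pre ncols)
    = colsOf (pre ++ rest) ncols := by
  induction rest with
  | nil => intro pre; simp
  | cons r rs ih =>
    intro pre
    rw [List.foldl_cons, stepRow pre r ncols, ih (pre ++ [r])]
    simp

-- B's pipeline equals the normal form
lemma foldB_eq (board : List (List Int)) (ncols : Nat) :
    (board.foldl (fun cols row =>
      (PySem.List.pyRange 0 (min (row.length : Int) (ncols : Int)) 1).foldl (fun cols c =>
        PySem.List.pySetD cols c
          (PySem.List.pyGetD cols c [] ++ [PySem.List.pyGetD row c 0])) cols)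
      ((List.range ncols).map (fun _ => ([] : List Int)))).foldl
      (fun out bucket => out ++ bucket.reverse) []
    = gather board ncols := by
  have hcols0 : ((List.range ncols).map (fun _ => ([] : List Int)))
      = colsOf [] ncols := by simp [colsOf]
  rw [hcols0, outerB ncols board []]
  rw [PySem.List.foldl_append_eq_flatMap]
  simp only [List.nil_append, colsOf, List.flatMap_map, gather]

-- ===== VERDICT (by name: the statement is the Claim_ definition above) =====
theorem board_to_list_spec : Claim_equal_board_to_list := by
  intro board _ _
  unfold Spec_board_to_list
  have hA : board_to_list board
      = gather board (PySem.List.pyGetD board (-1) []).length :=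
    foldA_eq board (PySem.List.pyGetD board (-1) []).length
  have hB : board_to_list_alt board
      = gather board (PySem.List.pyGetD board (-1) []).length :=
    foldB_eq board (PySem.List.pyGetD board (-1) []).length
  rw [hA, hB]
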